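-- pv_equiv track=rewrite | github.com/flyangovoyang/named-entity-recognition | bert_bilstm_crf/ner_data_util.py | generate_position_symbol
-- ===== SOURCE A (Python) =====
-- def generate_position_symbol(tags, tagging_schema):
--     """ add position symbol to tag sequence (name, name, name, O, pos, pos) => (B-name, M-name, ....) """
--     if tagging_schema == 'BIO':
--         pass
--     else:
--         # forward scan
--         mem = ''
--         mark = [0] * len(tags)
--         for i in range(len(tags)):
--             if tags[i] != 'O':
--                 if tags[i] == mem:
--                     mark[i] = mark[i - 1] + 1
--                 else:
--                     mark[i] = 1
--             mem = tags[i]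
--         # backward scan
--         next_mark = 0
--         symbol_res = ['O'] * len(tags)
--         for i in range(len(tags) - 1, -1, -1):
--             if mark[i] == 1:
--                 if next_mark <= 1:
--                     symbol_res[i] = 'S'
--                 else:  # 2
--                     symbol_res[i] = 'B'
--             elif mark[i] >= 2:
--                 if next_mark > mark[i]:
--                     symbol_res[i] = 'M'
--                 else:
--                     symbol_res[i] = 'E'
--             next_mark = mark[i]
--         # merge
--         merge_res = []
--         for symbol, category in zip(symbol_res, tags):
--             if symbol == 'O':
--                 merge_res.append('O')
--             else:
--                 merge_res.append(symbol + '-' + category)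
--         return merge_res
-- ===== SOURCE B (Python) =====
-- def generate_position_symbol(tags, tagging_schema):
--     """ add position symbol to tag sequence (name, name, name, O, pos, pos) => (B-name, M-name, ....) """
--     if tagging_schema == 'BIO':
--         return None
--     res = []
--     i, n = 0, len(tags)
--     while i < n:
--         j = i + 1
--         while j < n and tags[j] == tags[i]:
--             j += 1
--         key, ln = tags[i], j - i
--         if key == 'O':
--             res.extend(['O'] * ln)
--         elif ln == 1:
--             res.append('S-' + key)
--         else:
--             res.extend(['B-' + key] + ['M-' + key] * (ln - 2) + ['E-' + key])
--         i = j
--     return res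
-- ===== Notes on version B (the rewrite author's own statement) =====
-- stated objective: simpler
-- what changed: Replaced the two-array forward/backward marking scans with a single pass over maximal runs of equal tags that emits S / B,M...,E (or per-element O) directly from each run's length.
import Mathlib
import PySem

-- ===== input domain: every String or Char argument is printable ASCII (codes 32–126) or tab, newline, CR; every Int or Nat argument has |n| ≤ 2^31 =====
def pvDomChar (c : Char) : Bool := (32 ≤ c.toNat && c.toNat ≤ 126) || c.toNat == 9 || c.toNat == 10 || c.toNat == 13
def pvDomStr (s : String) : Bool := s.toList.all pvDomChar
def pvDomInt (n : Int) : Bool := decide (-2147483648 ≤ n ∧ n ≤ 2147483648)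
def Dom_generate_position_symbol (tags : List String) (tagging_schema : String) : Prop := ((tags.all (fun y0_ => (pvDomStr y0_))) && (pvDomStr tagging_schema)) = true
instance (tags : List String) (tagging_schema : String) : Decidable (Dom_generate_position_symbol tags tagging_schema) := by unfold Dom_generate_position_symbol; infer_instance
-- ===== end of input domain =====

-- B replaces A's forward/backward marking scans by a single pass over maximal runs of
-- equal tags, emitting S / B,M…,E (or per-element O) from each run's length (simpler).

-- ===== PORT A =====
-- body of A's forward-scan loop (one iteration, state = (mem, mark))
def pvFwdStep (tags : List String) (st : String × List Int) (i : Nat) : String × List Int :=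
  let mem := st.1
  let mark := st.2
  let t := (PySem.List.pyGet? tags (i : Int)).getD ""   -- tags[i]; i is in range, so pyGet? = some
  let mark := if t ≠ "O" then
      (if t = mem then
         -- mark[i] = mark[i-1] + 1 ; Python's i-1 at i=0 wraps to the last cell
         mark.set i (((PySem.List.pyGet? mark ((i : Int) - 1)).getD 0) + 1)
       else mark.set i 1)
    else mark
  (t, mark)

-- body of A's backward-scan loop (one iteration, state = (next_mark, symbol_res))
def pvBwdStep (mark : List Int) (st : Int × List String) (i : Nat) : Int × List String :=
  let next_mark := st.1
  let symbol_res := st.2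
  let m := (PySem.List.pyGet? mark (i : Int)).getD 0    -- mark[i]; i in range
  let symbol_res :=
    if m = 1 then symbol_res.set i (if next_mark ≤ 1 then "S" else "B")
    else if m ≥ 2 then symbol_res.set i (if next_mark > m then "M" else "E")
    else symbol_res
  (m, symbol_res)

def generate_position_symbol (tags : List String) (tagging_schema : String) : Option (List String) :=
  if tagging_schema = "BIO" then none
  else
    let n := tags.length
    -- forward scan: for i in range(len(tags))
    let fwd := (List.range n).foldl (pvFwdStep tags) ("", List.replicate n 0)
    let mark := fwd.2
    -- backward scan: for i in range(len(tags)-1, -1, -1), i.e. indices n-1 down to 0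
    let bwd := ((List.range n).reverse).foldl (pvBwdStep mark) ((0 : Int), List.replicate n "O")
    let symbol_res := bwd.2
    -- merge: for symbol, category in zip(symbol_res, tags)
    some ((symbol_res.zip tags).map (fun sc => if sc.1 = "O" then "O" else sc.1 ++ "-" ++ sc.2))

-- ===== PORT B =====
-- emission for one maximal run of `key` of length ln ≥ 1
def pvEmitRun (key : String) (ln : Nat) : List String :=
  if key = "O" then List.replicate ln "O"
  else if ln = 1 then ["S-" ++ key]
  else ("B-" ++ key) :: (List.replicate (ln - 2) ("M-" ++ key) ++ ["E-" ++ key])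

-- the outer while loop of Source B: peel one maximal run at a time
def pvScan : List String → List String
  | [] => []
  | x :: xs =>
    let r := xs.takeWhile (fun y => y = x)   -- the inner while loop: rest of the run
    pvEmitRun x (r.length + 1) ++ pvScan (xs.drop r.length)
termination_by l => l.length
decreasing_by
  simp only [List.length_drop, List.length_cons]
  omega

def generate_position_symbol_alt (tags : List String) (tagging_schema : String) : Option (List String) :=
  if tagging_schema = "BIO" then none
  else some (pvScan tags)

-- ===== PRECONDITION & SPEC =====
def Spec_generate_position_symbol (tags : List String) (tagging_schema : String) (out : Option (List String)) : Prop := out = generate_position_symbol_alt tags tagging_schema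
instance (tags : List String) (tagging_schema : String) (out : Option (List String)) : Decidable (Spec_generate_position_symbol tags tagging_schema out) := by unfold Spec_generate_position_symbol; infer_instance

-- ===== CLAIM (what is proved, stated in full; the proofs are below) =====
def Claim_equal_generate_position_symbol : Prop := ∀ (tags : List String) (tagging_schema : String), Dom_generate_position_symbol tags tagging_schema → Spec_generate_position_symbol tags tagging_schema (generate_position_symbol tags tagging_schema)

-- ===== LEMMAS AND PROOFS =====

-- the value A's forward scan writes at a position with previous tag p, previous mark pm
def pvStep (p : String) (pm : Int) (t : String) : Int :=
  if t ≠ "O" then (if t = p then pm + 1 else 1) else 0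

-- functional description of A's mark array
def pvMarkF (p : String) (pm : Int) : List String → List Int
  | [] => []
  | t :: ts => pvStep p pm t :: pvMarkF t (pvStep p pm t) ts

-- (prev tag, prev mark) after traversing l
def pvLastSt (p : String) (pm : Int) : List String → String × Int
  | [] => (p, pm)
  | t :: ts => pvLastSt t (pvStep p pm t) ts

-- the symbol A's backward scan writes given mark m and the mark to its right
def pvG (m nxt : Int) : String :=
  if m = 1 then (if nxt ≤ 1 then "S" else "B")
  else if m ≥ 2 then (if nxt > m then "M" else "E")
  else "O"

-- functional description of A's symbol array
def pvSyms : List Int → List String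
  | [] => []
  | m :: ms => pvG m (ms.headD 0) :: pvSyms ms

theorem pvMarkF_length (p : String) (pm : Int) (l : List String) : (pvMarkF p pm l).length = l.length := by
  induction l generalizing p pm with
  | nil => rfl
  | cons t ts ih => simp [pvMarkF, ih]

theorem pvSyms_length (l : List Int) : (pvSyms l).length = l.length := by
  induction l with
  | nil => rfl
  | cons m ms ih => simp [pvSyms, ih]

theorem pvMarkF_snoc (p : String) (pm : Int) (l : List String) (t : String) :
    pvMarkF p pm (l ++ [t]) = pvMarkF p pm l ++ [pvStep (pvLastSt p pm l).1 (pvLastSt p pm l).2 t] := by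
  induction l generalizing p pm with
  | nil => rfl
  | cons u us ih => simp [pvMarkF, pvLastSt, ih]

theorem pvLastSt_snoc (p : String) (pm : Int) (l : List String) (t : String) :
    pvLastSt p pm (l ++ [t]) = (t, pvStep (pvLastSt p pm l).1 (pvLastSt p pm l).2 t) := by
  induction l generalizing p pm with
  | nil => rfl
  | cons u us ih => simp [pvLastSt, ih]

theorem pvMarkF_getLast? (p : String) (pm : Int) (l : List String) (h : l ≠ []) :
    (pvMarkF p pm l).getLast? = some (pvLastSt p pm l).2 := by
  induction l generalizing p pm with
  | nil => exact absurd rfl h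
  | cons u us ih =>
    cases us with
    | nil => simp [pvMarkF, pvLastSt]
    | cons v vs => simpa [pvMarkF, pvLastSt] using ih (p := u) (pm := pvStep p pm u) (by simp)

-- ===== forward-scan invariant =====
theorem pv_fwd (tags : List String) (k : Nat) (hk : k ≤ tags.length) :
    (List.range k).foldl (pvFwdStep tags) ("", List.replicate tags.length 0)
    = ((pvLastSt "" 0 (tags.take k)).1,
       pvMarkF "" 0 (tags.take k) ++ List.replicate (tags.length - k) 0) := by
  induction k with
  | zero => simp [pvLastSt, pvMarkF]
  | succ k ih =>
    have hk' : k ≤ tags.length := Nat.le_of_succ_le hk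
    have hklt : k < tags.length := hk
    rw [List.range_succ, List.foldl_append, ih hk', List.foldl_cons, List.foldl_nil]
    simp only [pvFwdStep]
    have hlen : (tags.take k).length = k := by simp [hk']
    have hmlen : (pvMarkF "" 0 (tags.take k)).length = k := by rw [pvMarkF_length, hlen]
    have htake : tags.take (k+1) = tags.take k ++ [tags[k]] := by
      rw [List.take_add_one, List.getElem?_eq_getElem hklt]
      rfl
    have ht : (PySem.List.pyGet? tags (k : Int)).getD "" = tags[k] := by
      simp [PySem.List.pyGet?_natCast, List.getElem?_eq_getElem hklt]
    have hread : (PySem.List.pyGet? (pvMarkF "" 0 (tags.take k) ++ List.replicate (tags.length - k) 0) ((k : Int) - 1)).getD 0 = (pvLastSt "" 0 (tags.take k)).2 := by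
      cases k with
      | zero =>
        have h1 : tags.length - 0 ≠ 0 := by omega
        simp [pvMarkF, pvLastSt, PySem.List.pyGet?_neg_one, List.getLast?_replicate]
        split <;> rfl
      | succ j =>
        have hint : ((j+1 : Nat) : Int) - 1 = ((j : Nat) : Int) := by push_cast; ring
        rw [hint, PySem.List.pyGet?_natCast]
        have hj : j < (pvMarkF "" 0 (tags.take (j+1))).length := by omega
        rw [List.getElem?_append_left hj]
        have hne : tags.take (j+1) ≠ [] := by
          intro hc
          have := congrArg List.length hc
          simp [hlen] at this
        have := pvMarkF_getLast? "" 0 (tags.take (j+1)) hne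
        rw [List.getLast?_eq_getElem?] at this
        rw [hmlen] at this
        simp only [Nat.add_sub_cancel] at this
        simp [this]
    rw [htake, pvLastSt_snoc, pvMarkF_snoc]
    simp only [ht, hread]
    have hrep : List.replicate (tags.length - k) (0:Int) = 0 :: List.replicate (tags.length - (k+1)) 0 := by
      have : tags.length - k = (tags.length - (k+1)) + 1 := by omega
      rw [this, List.replicate_succ]
    simp only [Prod.mk.injEq, true_and]
    unfold pvStep
    by_cases hO : tags[k] = "O"
    · simp [hO, hrep]
    · have hset : ∀ v : Int, (pvMarkF "" 0 (tags.take k) ++ List.replicate (tags.length - k) 0).set k v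
            = (pvMarkF "" 0 (tags.take k) ++ [v]) ++ List.replicate (tags.length - (k+1)) 0 := by
          intro v
          rw [hrep, List.set_append, if_neg (by omega)]
          simp [hmlen]
      by_cases he : tags[k] = (pvLastSt "" 0 (tags.take k)).1
      · rw [← he]
        simp [hO, hset]
      · simp [hO, he, hset]

-- ===== backward-scan invariant =====
theorem pv_bwd (mark : List Int) (n : Nat) (hn : n = mark.length) (k : Nat) (hk : k ≤ n) :
    ((List.range k).reverse).foldl (pvBwdStep mark) (((mark.drop k).headD 0), List.replicate k "O" ++ pvSyms (mark.drop k))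
    = ((mark.headD 0), pvSyms mark) := by
  induction k with
  | zero => simp
  | succ k ih =>
    have hk' : k ≤ n := Nat.le_of_succ_le hk
    have hklt : k < mark.length := by omega
    have hdrop : mark.drop k = mark[k] :: mark.drop (k+1) := List.drop_eq_getElem_cons hklt
    rw [List.range_succ, List.reverse_append]
    simp only [List.reverse_cons, List.reverse_nil, List.nil_append, List.singleton_append,
      List.foldl_cons]
    simp only [pvBwdStep]
    have hm : (PySem.List.pyGet? mark (k : Int)).getD 0 = mark[k] := by
      simp [PySem.List.pyGet?_natCast, List.getElem?_eq_getElem hklt]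
    have hset : ∀ v : String, (List.replicate (k+1) "O" ++ pvSyms (mark.drop (k+1))).set k v
        = List.replicate k "O" ++ v :: pvSyms (mark.drop (k+1)) := by
      intro v
      rw [List.replicate_succ', List.append_assoc, List.set_append, if_neg (by simp)]
      simp
    have hstep : ((PySem.List.pyGet? mark (k : Int)).getD 0,
        if (PySem.List.pyGet? mark (k : Int)).getD 0 = 1 then
          (List.replicate (k+1) "O" ++ pvSyms (mark.drop (k+1))).set k
            (if (mark.drop (k+1)).headD 0 ≤ 1 then "S" else "B")
        else
          if (PySem.List.pyGet? mark (k : Int)).getD 0 ≥ 2 then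
            (List.replicate (k+1) "O" ++ pvSyms (mark.drop (k+1))).set k
              (if (mark.drop (k+1)).headD 0 > (PySem.List.pyGet? mark (k : Int)).getD 0 then "M" else "E")
          else List.replicate (k+1) "O" ++ pvSyms (mark.drop (k+1)))
        = (((mark.drop k).headD 0), List.replicate k "O" ++ pvSyms (mark.drop k)) := by
      simp only [hm]
      conv_rhs => rw [hdrop]
      simp only [List.headD_cons, pvSyms]
      unfold pvG
      split_ifs <;> simp [hset, List.replicate_succ', List.append_assoc]
    rw [hstep]
    exact ih hk'

-- ===== run-level analysis =====
theorem pvSyms_zeros (k : Nat) (ms : List Int) :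
    pvSyms (List.replicate k 0 ++ ms) = List.replicate k "O" ++ pvSyms ms := by
  induction k with
  | zero => rfl
  | succ k ih => simp [pvSyms, pvG, List.replicate_succ, ih]

-- an "O" run contributes mark 0 at every position
theorem pvMarkF_Orun (k : Nat) (rest : List String) : ∀ (p : String) (pm : Int),
    pvMarkF p pm ("O" :: (List.replicate k "O" ++ rest))
      = 0 :: (List.replicate k 0 ++ pvMarkF "O" 0 rest) := by
  induction k with
  | zero => intro p pm; simp [pvMarkF, pvStep]
  | succ k ih => intro p pm; simp [List.replicate_succ, pvMarkF, pvStep, ih]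

-- a continuing non-"O" run counts up from j+1
theorem pvMarkF_run (t : String) (ht : t ≠ "O") (k : Nat) (rest : List String) : ∀ j : Int,
    pvMarkF t j (List.replicate k t ++ rest)
      = (List.range k).map (fun i : Nat => j + 1 + (i : Int)) ++ pvMarkF t (j + k) rest := by
  induction k with
  | zero => simp
  | succ k ih =>
    intro j
    rw [List.replicate_succ, List.cons_append]
    have hstep : pvStep t j t = j + 1 := by simp [pvStep, ht]
    rw [show pvMarkF t j (t :: (List.replicate k t ++ rest))
        = pvStep t j t :: pvMarkF t (pvStep t j t) (List.replicate k t ++ rest) from rfl, hstep, ih (j+1)]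
    rw [List.range_succ_eq_map]
    simp only [List.map_cons, List.map_map, List.cons_append, List.cons.injEq]
    refine ⟨by push_cast; ring, ?_⟩
    congr 1
    · apply List.map_congr_left
      intro i _
      simp only [Function.comp_apply, Nat.succ_eq_add_one]
      push_cast; ring
    · congr 1
      push_cast; ring

-- the first mark after a finished run is 0 or 1
theorem pvMarkF_head_le_one (t : String) (m : Int) (rest : List String)
    (h : ∀ t', rest.head? = some t' → t' ≠ t) : ((pvMarkF t m rest).headD 0) ≤ 1 := by
  cases rest with
  | nil => simp [pvMarkF]
  | cons u us =>
    have hu : u ≠ t := h u rfl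
    by_cases hO : u = "O" <;> simp [pvMarkF, pvStep, hO, hu]

-- an ascending block starting at j ≥ 2 yields M,…,M,E
theorem pvSyms_asc (k : Nat) (hk : 1 ≤ k) : ∀ (j : Int) (ms : List Int), 2 ≤ j → ms.headD 0 ≤ 1 →
    pvSyms ((List.range k).map (fun i : Nat => j + (i : Int)) ++ ms)
      = List.replicate (k-1) "M" ++ "E" :: pvSyms ms := by
  induction k with
  | zero => omega
  | succ k ih =>
    intro j ms hj hm
    cases Nat.eq_zero_or_pos k with
    | inl h0 =>
      subst h0
      rw [show List.range (0+1) = [0] from rfl, show ([0] : List Nat).map (fun i : Nat => j + (i : Int)) = [j + ((0:Nat) : Int)] from rfl, List.singleton_append]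
      rw [show (j + ((0:Nat) : Int)) = j from by push_cast; ring]
      rw [show pvSyms (j :: ms) = pvG j (ms.headD 0) :: pvSyms ms from rfl]
      have : pvG j (ms.headD 0) = "E" := by
        unfold pvG
        rw [if_neg (by omega), if_pos (by omega), if_neg (by omega)]
      rw [List.headD_eq_head?] at this
      simp [this]
    | inr hpos =>
      rw [List.range_succ_eq_map]
      simp only [List.map_cons, List.map_map, List.cons_append]
      have hmm : ((List.range k).map ((fun i : Nat => j + (i : Int)) ∘ Nat.succ) ++ ms)
          = (List.range k).map (fun i : Nat => (j+1) + (i : Int)) ++ ms := by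
        congr 1
        apply List.map_congr_left
        intro i _
        simp only [Function.comp_apply, Nat.succ_eq_add_one]
        push_cast; ring
      rw [show pvSyms ((j + ((0:Nat) : Int)) :: ((List.range k).map ((fun i : Nat => j + (i : Int)) ∘ Nat.succ) ++ ms))
          = pvG (j + ((0:Nat) : Int)) ((((List.range k).map ((fun i : Nat => j + (i : Int)) ∘ Nat.succ) ++ ms)).headD 0)
            :: pvSyms ((List.range k).map ((fun i : Nat => j + (i : Int)) ∘ Nat.succ) ++ ms) from rfl]
      rw [hmm]
      have hhead : (((List.range k).map (fun i : Nat => (j+1) + (i : Int)) ++ ms)).headD 0 = j + 1 := by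
        cases k with
        | zero => omega
        | succ k2 =>
          rw [List.range_succ_eq_map]
          simp
      rw [hhead, ih hpos (j+1) ms (by omega) hm]
      have hG : pvG (j + ((0:Nat) : Int)) (j+1) = "M" := by
        unfold pvG
        rw [if_neg (by push_cast; omega), if_pos (by push_cast; omega), if_pos (by push_cast; omega)]
      rw [hG]
      have : k + 1 - 1 = (k - 1) + 1 := by omega
      rw [this, List.replicate_succ]
      simp

-- merge of a constant block
theorem pv_merge_replicate (n : Nat) (a b : String) :
    ((List.replicate n a).zip (List.replicate n b)).map
      (fun sc => if sc.1 = "O" then "O" else sc.1 ++ "-" ++ sc.2)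
      = List.replicate n (if a = "O" then "O" else a ++ "-" ++ b) := by
  induction n with
  | zero => rfl
  | succ n ih => simp only [List.replicate_succ, List.zip_cons_cons, List.map_cons, ih]

theorem pv_main (N : Nat) : ∀ (ts : List String) (p : String) (pm : Int), ts.length ≤ N →
    (∀ t', ts.head? = some t' → t' = p → pm = 0) →
    ((pvSyms (pvMarkF p pm ts)).zip ts).map (fun sc => if sc.1 = "O" then "O" else sc.1 ++ "-" ++ sc.2)
      = pvScan ts := by
  induction N with
  | zero =>
    intro ts p pm hlen _
    have : ts = [] := List.eq_nil_of_length_eq_zero (by omega)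
    subst this
    simp [pvMarkF, pvSyms, pvScan]
  | succ N ih =>
    intro ts p pm hlen hcond
    cases ts with
    | nil => simp [pvMarkF, pvSyms, pvScan]
    | cons t rest0 =>
      -- decompose the head run
      obtain ⟨k1, hk1⟩ : ∃ k1, (rest0.takeWhile (fun y => y = t)).length = k1 := ⟨_, rfl⟩
      obtain ⟨rest, hrestdef⟩ : ∃ r, rest0.drop k1 = r := ⟨_, rfl⟩
      have hrun : rest0.takeWhile (fun y => y = t) = List.replicate k1 t := by
        rw [List.eq_replicate_iff]
        refine ⟨hk1, ?_⟩
        intro b hb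
        exact of_decide_eq_true (List.mem_takeWhile_imp (p := fun y => decide (y = t)) hb)
      have h0 : List.replicate k1 t ++ rest0.dropWhile (fun y => y = t) = rest0 := by
        rw [← hrun]; exact List.takeWhile_append_dropWhile
      have hdw : rest0.dropWhile (fun y => y = t) = rest := by
        have := congrArg (List.drop k1) h0
        rwa [List.drop_left' (by simp), hrestdef] at this
      have hsplit : rest0 = List.replicate k1 t ++ rest := by
        rw [← hdw, ← hrun]
        exact (List.takeWhile_append_dropWhile).symm
      have hfresh : ∀ t', rest.head? = some t' → t' ≠ t := by
        intro t' hh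
        rw [← hdw] at hh
        have := List.head?_dropWhile_not (fun y => decide (y = t)) rest0
        rw [hh] at this
        simpa using this
      have hrlen : rest.length ≤ N := by
        have h1 : rest0.length ≤ N := by simpa using hlen
        have : rest.length ≤ rest0.length := by rw [← hrestdef]; simp
        omega
      have hscan : pvScan (t :: rest0) = pvEmitRun t (k1 + 1) ++ pvScan rest := by
        rw [pvScan]
        simp only [hk1, hrestdef]
      by_cases hO : t = "O"
      · -- an "O" run
        subst hO
        rw [hscan]
        conv_lhs => rw [hsplit]
        rw [pvMarkF_Orun]
        rw [show ((0:Int) :: (List.replicate k1 0 ++ pvMarkF "O" 0 rest))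
            = List.replicate (k1+1) 0 ++ pvMarkF "O" 0 rest from by
          rw [List.replicate_succ]; simp]
        rw [pvSyms_zeros]
        rw [show ("O" :: (List.replicate k1 "O" ++ rest))
            = List.replicate (k1+1) "O" ++ rest from by
          rw [List.replicate_succ]; simp]
        rw [List.zip_append (by simp [pvSyms_length, pvMarkF_length]), List.map_append]
        rw [pv_merge_replicate]
        rw [ih rest "O" 0 hrlen (by intro t' _ _; rfl)]
        simp [pvEmitRun]
      · -- a non-"O" run
        have hv1 : pvStep p pm t = 1 := by
          unfold pvStep
          by_cases hp : t = p
          · rw [if_pos hO, if_pos hp, hcond t rfl hp]; norm_num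
          · rw [if_pos hO, if_neg hp]
        have hml : (pvMarkF t (1 + (k1:Int)) rest).headD 0 ≤ 1 :=
          pvMarkF_head_le_one t _ rest hfresh
        have hmarks : pvMarkF p pm (t :: rest0)
            = 1 :: ((List.range k1).map (fun i : Nat => (1:Int) + 1 + (i : Int))
                ++ pvMarkF t (1 + (k1:Int)) rest) := by
          rw [show pvMarkF p pm (t :: rest0)
              = pvStep p pm t :: pvMarkF t (pvStep p pm t) rest0 from rfl, hv1]
          conv_lhs => rw [hsplit]
          rw [pvMarkF_run t hO k1 rest 1]
        have hIH : ((pvSyms (pvMarkF t (1 + (k1:Int)) rest)).zip rest).map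
            (fun sc => if sc.1 = "O" then "O" else sc.1 ++ "-" ++ sc.2) = pvScan rest :=
          ih rest t (1 + (k1:Int)) hrlen (by
            intro t' hh ht'
            exact absurd ht' (hfresh t' hh))
        rw [hscan, hmarks]
        cases Nat.eq_zero_or_pos k1 with
        | inl hz =>
          subst hz
          rw [show ((0:Nat) : Int) = (0:Int) from rfl] at *
          simp only [List.range_zero, List.map_nil, List.nil_append]
          rw [show pvSyms ((1:Int) :: pvMarkF t (1 + (0:Int)) rest)
              = pvG 1 ((pvMarkF t (1 + (0:Int)) rest).headD 0)
                :: pvSyms (pvMarkF t (1 + (0:Int)) rest) from rfl]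
          have hg : pvG 1 ((pvMarkF t (1 + (0:Int)) rest).headD 0) = "S" := by
            unfold pvG
            rw [if_pos rfl, if_pos (by simpa using hml)]
          rw [hg]
          have hr0 : rest0 = rest := by simpa using hsplit
          rw [hr0, List.zip_cons_cons, List.map_cons, hIH]
          simp [pvEmitRun, hO]
        | inr hpos =>
          have hnext : (((List.range k1).map (fun i : Nat => (1:Int) + 1 + (i : Int))
              ++ pvMarkF t (1 + (k1:Int)) rest)).headD 0 = 2 := by
            cases k1 with
            | zero => omega
            | succ k2 =>
              rw [List.range_succ_eq_map]
              simp
          have hasc : (List.range k1).map (fun i : Nat => (1:Int) + 1 + (i : Int))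
              = (List.range k1).map (fun i : Nat => (2:Int) + (i : Int)) := by
            apply List.map_congr_left; intro i _; ring
          rw [show pvSyms ((1:Int) :: ((List.range k1).map (fun i : Nat => (1:Int) + 1 + (i : Int))
                ++ pvMarkF t (1 + (k1:Int)) rest))
              = pvG 1 ((((List.range k1).map (fun i : Nat => (1:Int) + 1 + (i : Int))
                ++ pvMarkF t (1 + (k1:Int)) rest)).headD 0)
                :: pvSyms ((List.range k1).map (fun i : Nat => (1:Int) + 1 + (i : Int))
                ++ pvMarkF t (1 + (k1:Int)) rest) from rfl]
          rw [hnext, hasc, pvSyms_asc k1 hpos 2 _ (by norm_num) hml]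
          have hgB : pvG 1 2 = "B" := by unfold pvG; norm_num
          rw [hgB]
          -- split tags as t :: (replicate (k1-1) t ++ [t] ++ rest)
          have hrep : List.replicate k1 t = List.replicate (k1-1) t ++ [t] := by
            have : k1 = (k1-1) + 1 := by omega
            rw [this, List.replicate_succ']
            simp
          conv_lhs => rw [hsplit, hrep]
          rw [show (("B":String) :: (List.replicate (k1-1) "M" ++ "E" :: pvSyms (pvMarkF t (1 + (k1:Int)) rest)))
              = ("B":String) :: (List.replicate (k1-1) "M" ++ ([("E":String)] ++ pvSyms (pvMarkF t (1 + (k1:Int)) rest))) from by simp]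
          rw [show (t :: (List.replicate (k1-1) t ++ [t] ++ rest))
              = t :: (List.replicate (k1-1) t ++ ([t] ++ rest)) from by simp]
          rw [List.zip_cons_cons, List.map_cons]
          rw [List.zip_append (by simp), List.zip_append (by simp), List.map_append, List.map_append]
          rw [pv_merge_replicate, hIH]
          have hne : ¬(k1 + 1 = 1) := by omega
          have h2 : k1 + 1 - 2 = k1 - 1 := by omega
          have eB : ("B":String) ++ "-" = "B-" := rfl
          have eM : ("M":String) ++ "-" = "M-" := rfl
          have eE : ("E":String) ++ "-" = "E-" := rfl
          have hz : ¬ k1 = 0 := by omega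
          simp [pvEmitRun, hO, h2, eB, eM, eE, hz, List.append_assoc]

-- ===== VERDICT (by name: the statement is the Claim_ definition above) =====
theorem generate_position_symbol_spec : Claim_equal_generate_position_symbol := by
  intro tags schema _
  unfold Spec_generate_position_symbol generate_position_symbol generate_position_symbol_alt
  by_cases h : schema = "BIO"
  · simp [h]
  · have hf : ((List.range tags.length).foldl (pvFwdStep tags) ("", List.replicate tags.length 0)).2
        = pvMarkF "" 0 tags := by
      rw [pv_fwd tags tags.length le_rfl]
      simp
    have hmlen : (pvMarkF "" 0 tags).length = tags.length := pvMarkF_length _ _ _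
    have hdrop : (pvMarkF "" 0 tags).drop tags.length = [] := by
      rw [← hmlen]; exact List.drop_length
    have hb := pv_bwd (pvMarkF "" 0 tags) tags.length hmlen.symm tags.length le_rfl
    rw [hdrop] at hb
    simp only [List.headD_nil, pvSyms, List.append_nil] at hb
    simp only [h, if_false, hf, hb]
    rw [pv_main tags.length tags "" 0 le_rfl (by intro t' _ _; rfl)]
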